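-- pv_equiv track=rewrite | github.com/sykwon/sigmod2025like | src/LPLM/misc_utils.py | LIKE_pattern_to_newLanguage
-- ===== SOURCE A (Python) =====
-- def LIKE_pattern_to_newLanguage(pattern_list, pattern_type):
--     transformed_pattern = ''
--     for pattern in pattern_list:
--         if len(pattern) == 1:
--             transformed_pattern += pattern
--         else:
--             new_pattern = ''
--             count = 0
--             for char in pattern:
--                 if count < 1:
--                     new_pattern += char
--                     count += 1
--                 else:
--                     if (
--                         new_pattern[-1] not in ('_', '@')
--                         and char not in ('_', '@')
--                     ):
--                         new_pattern += char + '$'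
--                     else:
--                         new_pattern += char
--             transformed_pattern += new_pattern
--     if pattern_type == 'prefix':
--         transformed_pattern = f'{transformed_pattern[0]}.{transformed_pattern[1:]}'
--     elif pattern_type == 'suffix':
--         transformed_pattern += '#'
--     elif pattern_type == 'end_underscore':
--         transformed_pattern = (
--             f'{transformed_pattern[0]}.{transformed_pattern[1:]}')
--     elif pattern_type == 'begin_underscore':
--         transformed_pattern = (
--             f'{transformed_pattern[0]}{transformed_pattern[1:]}#')
--     elif pattern_type == 'prefix_suffix':
--         transformed_pattern = (
--             f'{transformed_pattern[0]}.{transformed_pattern[1:]}#')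
--     return transformed_pattern
-- ===== SOURCE B (Python) =====
-- def LIKE_pattern_to_newLanguage(pattern_list, pattern_type):
--     # Run-splitting algorithm: cut each pattern into maximal runs of special
--     # ('_'/'@') vs ordinary characters; special runs pass through, ordinary runs
--     # keep their first char and get '$' after every later char.  No neighbour
--     # comparison and no carried last-emitted state.
--     def transform(p):
--         out = []
--         i, n = 0, len(p)
--         while i < n:
--             sp = p[i] in ('_', '@')
--             j = i + 1
--             while j < n and (p[j] in ('_', '@')) == sp:
--                 j += 1
--             run = p[i:j]
--             out.append(run if sp else run[0] + ''.join(c + '$' for c in run[1:]))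
--             i = j
--         return ''.join(out)
--     t = ''.join(transform(p) for p in pattern_list)
--     if pattern_type in ('prefix', 'end_underscore'):
--         return t[0] + '.' + t[1:]
--     if pattern_type in ('suffix', 'begin_underscore'):
--         return t + '#'
--     if pattern_type == 'prefix_suffix':
--         return t[0] + '.' + t[1:] + '#'
--     return t
-- ===== Notes on version B (the rewrite author's own statement) =====
-- stated objective: alternative
-- what changed: B replaces A's per-character pass with carried state (count flag and last-emitted char new_pattern[-1]) by run-splitting: each pattern is cut into maximal runs of special ('_'/'@') vs ordinary characters, special runs pass through and ordinary runs get '$' after every char but their first, with the duplicate dispatch branches merged.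
import Mathlib
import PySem

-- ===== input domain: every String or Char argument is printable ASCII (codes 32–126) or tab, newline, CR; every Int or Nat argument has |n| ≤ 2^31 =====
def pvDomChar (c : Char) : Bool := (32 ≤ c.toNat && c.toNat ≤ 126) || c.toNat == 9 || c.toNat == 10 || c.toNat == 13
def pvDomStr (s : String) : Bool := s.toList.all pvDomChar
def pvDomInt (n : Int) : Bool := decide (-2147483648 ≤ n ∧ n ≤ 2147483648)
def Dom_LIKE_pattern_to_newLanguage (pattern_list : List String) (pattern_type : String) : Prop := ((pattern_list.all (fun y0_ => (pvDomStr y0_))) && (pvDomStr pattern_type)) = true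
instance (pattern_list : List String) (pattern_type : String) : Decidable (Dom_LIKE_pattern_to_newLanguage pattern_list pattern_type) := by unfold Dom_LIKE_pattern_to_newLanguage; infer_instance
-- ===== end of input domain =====

-- B replaces A's stateful inner pass (count flag + last-emitted char new_pattern[-1]) by
-- run-splitting: maximal runs of '_'/'@' vs ordinary chars, ordinary runs get '$' after
-- every char but their first (alternative decomposition, same cost).


-- ===== PORT A =====
-- inner loop state: (new_pattern, count); new_pattern[-1] is ported as getLastD (new_pattern is
-- nonempty whenever the branch reading it runs, since count ≥ 1 there, so the default is never used)
def pvA_step (st : List Char × Nat) (c : Char) : List Char × Nat :=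
  if st.2 < 1 then (st.1 ++ [c], st.2 + 1)
  else if !(st.1.getLastD ' ' == '_' || st.1.getLastD ' ' == '@') && !(c == '_' || c == '@') then
    (st.1 ++ [c, '$'], st.2)
  else (st.1 ++ [c], st.2)

def LIKE_pattern_to_newLanguage (pattern_list : List String) (pattern_type : String) : String :=
  let t := pattern_list.foldl (fun acc p =>
      if p.toList.length == 1 then acc ++ p.toList
      else acc ++ (p.toList.foldl pvA_step ([], 0)).1) []
  -- transformed_pattern[0] raises IndexError in Python when t = []; those inputs are outside Pre_
  if pattern_type == "prefix" then
    match t with | [] => "" | c :: rest => String.ofList (c :: '.' :: rest)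
  else if pattern_type == "suffix" then String.ofList (t ++ ['#'])
  else if pattern_type == "end_underscore" then
    match t with | [] => "" | c :: rest => String.ofList (c :: '.' :: rest)
  else if pattern_type == "begin_underscore" then
    match t with | [] => "" | c :: rest => String.ofList (c :: rest ++ ['#'])
  else if pattern_type == "prefix_suffix" then
    match t with | [] => "" | c :: rest => String.ofList (c :: '.' :: rest ++ ['#'])
  else String.ofList t

-- ===== PORT B =====
-- run-splitting: p[i:j] is the maximal run with the same '_'/'@'-class as p[i];
-- the while-advance of j is ported as takeWhile/dropWhile on the tail
def pvSpecial (c : Char) : Bool := c == '_' || c == '@'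

def pvB_transform : List Char → List Char
  | [] => []
  | c :: tl =>
    (if pvSpecial c then
        c :: tl.takeWhile (fun x => pvSpecial x == pvSpecial c)
      else
        c :: (tl.takeWhile (fun x => pvSpecial x == pvSpecial c)).flatMap (fun x => [x, '$']))
    ++ pvB_transform (tl.dropWhile (fun x => pvSpecial x == pvSpecial c))
termination_by l => l.length
decreasing_by
  have := List.length_dropWhile_le (fun x => pvSpecial x == pvSpecial c) tl
  simpa using Nat.lt_succ_of_le this

def LIKE_pattern_to_newLanguage_alt (pattern_list : List String) (pattern_type : String) : String :=
  let t := (pattern_list.map (fun p => pvB_transform p.toList)).flatten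
  -- t[0] raises IndexError in Python when t = []; those inputs are outside Pre_
  if pattern_type == "prefix" || pattern_type == "end_underscore" then
    match t with | [] => "" | c :: rest => String.ofList (c :: '.' :: rest)
  else if pattern_type == "suffix" || pattern_type == "begin_underscore" then
    String.ofList (t ++ ['#'])
  else if pattern_type == "prefix_suffix" then
    match t with | [] => "" | c :: rest => String.ofList (c :: '.' :: rest ++ ['#'])
  else String.ofList t

-- ===== PRECONDITION & SPEC =====
-- Pre_ excludes exactly the inputs where A raises IndexError on transformed_pattern[0]: a
-- pattern_type that indexes the transformed string while every pattern is empty.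
def Pre_LIKE_pattern_to_newLanguage (pattern_list : List String) (pattern_type : String) : Prop :=
  (pattern_type = "prefix" ∨ pattern_type = "end_underscore" ∨ pattern_type = "begin_underscore"
    ∨ pattern_type = "prefix_suffix") → ∃ p ∈ pattern_list, p ≠ ""
instance (pattern_list : List String) (pattern_type : String) : Decidable (Pre_LIKE_pattern_to_newLanguage pattern_list pattern_type) := by unfold Pre_LIKE_pattern_to_newLanguage; infer_instance

def pvWitness_LIKE_pattern_to_newLanguage : List String × String := (["abc", "a_b"], "prefix")

def Spec_LIKE_pattern_to_newLanguage (pattern_list : List String) (pattern_type : String) (out : String) : Prop := out = LIKE_pattern_to_newLanguage_alt pattern_list pattern_type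
instance (pattern_list : List String) (pattern_type : String) (out : String) : Decidable (Spec_LIKE_pattern_to_newLanguage pattern_list pattern_type out) := by unfold Spec_LIKE_pattern_to_newLanguage; infer_instance

-- ===== CLAIM (what is proved, stated in full; the proofs are below) =====
def Claim_equal_LIKE_pattern_to_newLanguage : Prop := ∀ (pattern_list : List String) (pattern_type : String), Dom_LIKE_pattern_to_newLanguage pattern_list pattern_type → Pre_LIKE_pattern_to_newLanguage pattern_list pattern_type → Spec_LIKE_pattern_to_newLanguage pattern_list pattern_type (LIKE_pattern_to_newLanguage pattern_list pattern_type)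

-- ===== LEMMAS AND PROOFS =====

-- A's emission after the first char, written as structural recursion carrying the previous char
def pvDollars (a : Char) : List Char → List Char
  | [] => []
  | b :: bs => (if !(a == '_' || a == '@') && !(b == '_' || b == '@') then [b, '$'] else [b]) ++ pvDollars b bs

-- A's whole per-pattern transform in charwise form
def pvCharwise : List Char → List Char
  | [] => []
  | a :: rest => a :: pvDollars a rest

-- invariant of A's inner loop: last emitted char passes the '_'/'@' test iff the original
-- previous char does
lemma pvA_loop_eq (rest : List Char) : ∀ (acc : List Char) (a : Char),
    (!(acc.getLastD ' ' == '_' || acc.getLastD ' ' == '@')) = (!(a == '_' || a == '@')) →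
    (rest.foldl pvA_step (acc, 1)).1 = acc ++ pvDollars a rest := by
  induction rest with
  | nil => intro acc a _; simp [pvDollars]
  | cons b bs ih =>
    intro acc a h
    by_cases hb : (!(a == '_' || a == '@') && !(b == '_' || b == '@')) = true
    · have hstep : pvA_step (acc, 1) b = (acc ++ [b, '$'], 1) := by
        simp only [pvA_step]
        rw [if_neg (by omega), h, if_pos hb]
      have hbb : (!(b == '_' || b == '@')) = true := ((Bool.and_eq_true _ _).mp hb).2
      simp only [List.foldl_cons, hstep]
      rw [ih (acc ++ [b, '$']) b (by simp [hbb]), pvDollars, if_pos hb]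
      simp
    · have hb' : ¬ ((!(a == '_' || a == '@') && !(b == '_' || b == '@')) = true) := hb
      have hstep : pvA_step (acc, 1) b = (acc ++ [b], 1) := by
        simp only [pvA_step]
        rw [if_neg (by omega), h, if_neg hb']
      simp only [List.foldl_cons, hstep]
      rw [ih (acc ++ [b]) b (by simp), pvDollars, if_neg hb']
      simp

lemma pvA_inner_eq (p : List Char) :
    (p.foldl pvA_step ([], 0)).1 = pvCharwise p := by
  cases p with
  | nil => rfl
  | cons c rest =>
    have h0 : pvA_step ([], 0) c = ([c], 1) := by simp [pvA_step]
    simp only [List.foldl_cons, h0]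
    rw [pvA_loop_eq rest [c] c (by simp)]
    rfl

-- pvDollars through a special run
lemma pvDollars_special (tl : List Char) : ∀ (c : Char), pvSpecial c = true →
    pvDollars c tl = tl.takeWhile (fun x => pvSpecial x) ++ pvCharwise (tl.dropWhile (fun x => pvSpecial x)) := by
  induction tl with
  | nil => intro c _; simp [pvDollars, pvCharwise]
  | cons b bs ih =>
    intro c hc
    have hc' : (c == '_' || c == '@') = true := hc
    by_cases hb : pvSpecial b = true
    · have hb' : (b == '_' || b == '@') = true := hb
      rw [pvDollars, ih b hb]
      simp [hb, hc', hb']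
    · have hbf : pvSpecial b = false := by simpa using hb
      have hb' : (b == '_' || b == '@') = false := hbf
      rw [pvDollars]
      simp [hbf, hc', hb', pvCharwise]

-- pvDollars through an ordinary run
lemma pvDollars_ordinary (tl : List Char) : ∀ (c : Char), pvSpecial c = false →
    pvDollars c tl = (tl.takeWhile (fun x => !pvSpecial x)).flatMap (fun x => [x, '$'])
      ++ pvCharwise (tl.dropWhile (fun x => !pvSpecial x)) := by
  induction tl with
  | nil => intro c _; simp [pvDollars, pvCharwise]
  | cons b bs ih =>
    intro c hc
    have hc' : (c == '_' || c == '@') = false := hc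
    by_cases hb : pvSpecial b = true
    · have hb' : (b == '_' || b == '@') = true := hb
      rw [pvDollars]
      simp [hb, hc', hb', pvCharwise]
    · have hbf : pvSpecial b = false := by simpa using hb
      have hb' : (b == '_' || b == '@') = false := hbf
      rw [pvDollars, ih b hbf]
      simp [hbf, hc', hb']

-- B's run-splitting recursion computes A's charwise transform
lemma pvB_eq_charwise (l : List Char) : pvB_transform l = pvCharwise l := by
  induction l using pvB_transform.induct with
  | case1 => simp [pvB_transform, pvCharwise]
  | case2 c tl ih =>
    rw [pvB_transform, ih, pvCharwise]
    by_cases hc : pvSpecial c = true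
    · have heq : (fun x => pvSpecial x == pvSpecial c) = (fun x => pvSpecial x) := by
        funext x; rw [hc]; cases pvSpecial x <;> rfl
      rw [if_pos hc, heq, pvDollars_special tl c hc]
      simp
    · have hcf : pvSpecial c = false := by simpa using hc
      have heq : (fun x => pvSpecial x == pvSpecial c) = (fun x => !pvSpecial x) := by
        funext x; rw [hcf]; cases pvSpecial x <;> rfl
      rw [if_neg (by simp [hcf]), heq, pvDollars_ordinary tl c hcf]
      simp

lemma pvT_eq (pattern_list : List String) :
    pattern_list.foldl (fun acc p =>
      if p.toList.length == 1 then acc ++ p.toList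
      else acc ++ (p.toList.foldl pvA_step ([], 0)).1) []
    = (pattern_list.map (fun p => pvB_transform p.toList)).flatten := by
  have hstep : ∀ (acc : List Char) (p : String),
      (if p.toList.length == 1 then acc ++ p.toList
       else acc ++ (p.toList.foldl pvA_step ([], 0)).1) = acc ++ pvB_transform p.toList := by
    intro acc p
    rw [pvB_eq_charwise]
    by_cases h1 : p.toList.length = 1
    · obtain ⟨c, hc⟩ := List.length_eq_one_iff.mp h1
      rw [if_pos (beq_iff_eq.mpr h1), hc]
      rfl
    · rw [if_neg (by simpa using h1), pvA_inner_eq]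
  have gen : ∀ (l : List String) (acc : List Char),
      l.foldl (fun acc p =>
        if p.toList.length == 1 then acc ++ p.toList
        else acc ++ (p.toList.foldl pvA_step ([], 0)).1) acc
      = acc ++ (l.map (fun p => pvB_transform p.toList)).flatten := by
    intro l
    induction l with
    | nil => simp
    | cons p ps ih =>
      intro acc
      simp only [List.foldl_cons]
      rw [hstep, ih, List.map_cons, List.flatten_cons, List.append_assoc]
  simpa using gen pattern_list []

lemma pvT_ne_nil (pattern_list : List String) (hp : ∃ p ∈ pattern_list, p ≠ "") :
    (pattern_list.map (fun p => pvB_transform p.toList)).flatten ≠ [] := by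
  obtain ⟨p, hmem, hne⟩ := hp
  intro hnil
  rw [List.flatten_eq_nil_iff] at hnil
  have := hnil (pvB_transform p.toList) (List.mem_map_of_mem hmem)
  rw [pvB_eq_charwise] at this
  have hpl : p.toList ≠ [] := by simpa using hne
  cases hpc : p.toList with
  | nil => exact hpl hpc
  | cons c cs =>
    rw [hpc] at this
    simp [pvCharwise] at this

-- ===== VERDICT (by name: the statement is the Claim_ definition above) =====
theorem LIKE_pattern_to_newLanguage_spec : Claim_equal_LIKE_pattern_to_newLanguage := by
  intro pattern_list pattern_type _hdom hpre
  unfold Spec_LIKE_pattern_to_newLanguage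
  unfold LIKE_pattern_to_newLanguage LIKE_pattern_to_newLanguage_alt
  simp only [pvT_eq]
  set t := (pattern_list.map (fun p => pvB_transform p.toList)).flatten with ht
  by_cases h1 : pattern_type = "prefix"
  · simp [h1]
  by_cases h2 : pattern_type = "suffix"
  · simp [h2]
  by_cases h3 : pattern_type = "end_underscore"
  · simp [h3]
  by_cases h4 : pattern_type = "begin_underscore"
  · have htne : t ≠ [] := pvT_ne_nil pattern_list (hpre (by tauto))
    cases hc : t with
    | nil => exact absurd hc htne
    | cons c rest => simp [h4]
  by_cases h5 : pattern_type = "prefix_suffix"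
  · simp [h5]
  · simp [h1, h2, h3, h4, h5]
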